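-- pv_equiv track=rewrite | github.com/nh0317/Python_Coding_Test | 백준/Gold/17140. 이차원 배열과 연산/이차원 배열과 연산.py | op_r
-- ===== SOURCE A (Python) =====
-- from collections import Counter
--
-- def op_r(arr):
--     new_list = [[] for _ in range(len(arr))]
--     maxx = 0
--     for i,a in enumerate(arr):
--         count = Counter(a)
--         count = sorted(count.items(), key=lambda x: (x[1], x[0]))
--         for k,v in count:
--             if k == 0:
--                 continue
--             new_list[i].extend([k,v])
--         maxx = max(maxx, len(new_list[i]))
--
--     for i in range(len(new_list)):
--         new_list[i] += [0] * (maxx-len(new_list[i]))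
--     return new_list
-- ===== SOURCE B (Python) =====
-- def op_r(arr):
--     rows = []
--     for a in arr:
--         s = sorted(a)
--         pairs = []
--         i = 0
--         n = len(s)
--         while i < n:
--             j = i
--             while j < n and s[j] == s[i]:
--                 j += 1
--             if s[i] != 0:
--                 pairs.append((j - i, s[i]))
--             i = j
--         pairs.sort()
--         enc = []
--         for c, v in pairs:
--             enc.append(v)
--             enc.append(c)
--         rows.append(enc)
--     width = max(map(len, rows), default=0)
--     return [r + [0] * (width - len(r)) for r in rows]
-- ===== Notes on version B (the rewrite author's own statement) =====
-- stated objective: alternative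
-- what changed: B tallies each row by sorting it and run-length scanning equal runs instead of building a Counter dict, sorts the (count,value) pairs with the plain tuple order, and computes the padding width in a separate pass with max(..., default=0) instead of a running maximum.
import Mathlib
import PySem

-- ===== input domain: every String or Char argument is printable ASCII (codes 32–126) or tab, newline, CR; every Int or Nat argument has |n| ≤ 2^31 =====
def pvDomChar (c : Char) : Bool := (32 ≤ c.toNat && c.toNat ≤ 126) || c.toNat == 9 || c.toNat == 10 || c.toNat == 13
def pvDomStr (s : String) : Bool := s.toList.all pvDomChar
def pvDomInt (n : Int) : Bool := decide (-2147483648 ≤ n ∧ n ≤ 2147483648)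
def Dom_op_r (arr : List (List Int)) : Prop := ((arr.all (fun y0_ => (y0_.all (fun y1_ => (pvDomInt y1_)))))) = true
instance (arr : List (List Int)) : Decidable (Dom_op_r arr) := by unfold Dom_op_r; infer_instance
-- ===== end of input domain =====

-- B replaces the Counter tally by a sort + run-length scan per row and computes the padding width afterwards (objective: alternative).

-- ===== PORT A =====
-- literal port: new_list rows are built one by one while maxx tracks the running maximum length
def op_r (arr : List (List Int)) : List (List Int) :=
  let st := arr.foldl (fun (st : List (List Int) × Int) a =>
      let count := PySem.List.sorted2 (PySem.Dict.counter a).items (fun x => x.2) (fun x => x.1)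
      let row := count.foldl (fun acc kv => if kv.1 = 0 then acc else acc ++ [kv.1, kv.2]) []
      (st.1 ++ [row], max st.2 (row.length : Int))) ([], 0)
  st.1.map (fun r => r ++ List.replicate (st.2 - (r.length : Int)).toNat 0)

-- ===== PORT B =====
-- the run-length scan over the sorted row: (count, value) pairs of the runs, zero runs skipped
def rlePairs_alt : List Int → List (Int × Int)
  | [] => []
  | x :: t =>
    let rest := rlePairs_alt (t.dropWhile (· == x))
    if x ≠ 0 then (((t.takeWhile (· == x)).length + 1 : Int), x) :: rest else rest
termination_by l => l.length
decreasing_by simpa using Nat.lt_succ_of_le (List.length_dropWhile_le _ _)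

def op_r_alt (arr : List (List Int)) : List (List Int) :=
  let rows := arr.map (fun a =>
    let pairs := PySem.List.sorted2 (rlePairs_alt (PySem.List.sorted a (fun x => x)))
                    (fun p => p.1) (fun p => p.2)
    pairs.foldl (fun acc cv => acc ++ [cv.2, cv.1]) [])
  let width := match PySem.List.max? (rows.map List.length) (fun n => n) with
    | none => 0
    | some w => w
  rows.map (fun r => r ++ List.replicate (width - r.length) 0)

-- ===== PRECONDITION & SPEC =====
def Spec_op_r (arr : List (List Int)) (out : List (List Int)) : Prop := out = op_r_alt arr
instance (arr : List (List Int)) (out : List (List Int)) : Decidable (Spec_op_r arr out) := by unfold Spec_op_r; infer_instance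

-- ===== CLAIM (what is proved, stated in full; the proofs are below) =====
def Claim_equal_op_r : Prop := ∀ (arr : List (List Int)), Dom_op_r arr → Spec_op_r arr (op_r arr)

-- ===== LEMMAS AND PROOFS =====

-- everything after a sorted list's leading run is strictly larger than the head
theorem drop_gt (x : Int) (t : List Int) (hs : (x :: t).Pairwise (· ≤ ·)) :
    ∀ y ∈ t.dropWhile (· == x), x < y := by
  have ht : t.Pairwise (· ≤ ·) := hs.of_cons
  have hd : (t.dropWhile (· == x)).Pairwise (· ≤ ·) := ht.sublist (List.dropWhile_sublist _)
  have hle : ∀ y ∈ t, x ≤ y := fun y hy => List.rel_of_pairwise_cons hs hy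
  cases hr : t.dropWhile (· == x) with
  | nil => simp
  | cons z w =>
    have hz : (z == x) = false := by
      have := List.head?_dropWhile_not (· == x) t
      rw [hr] at this; simpa using this
    have hzx : x < z := by
      have h1 : x ≤ z := hle z ((hr ▸ List.dropWhile_sublist (fun x_1 => x_1 == x) (l := t)).subset List.mem_cons_self)
      have h2 : z ≠ x := by simpa using hz
      omega
    intro y hy
    rcases List.mem_cons.1 hy with h | h
    · omega
    · have : z ≤ y := by rw [hr] at hd; exact List.rel_of_pairwise_cons hd h
      omega

-- the head's multiplicity in a sorted list is the length of its leading run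
theorem count_head (x : Int) (t : List Int) (hs : (x :: t).Pairwise (· ≤ ·)) :
    (x :: t).count x = (t.takeWhile (· == x)).length + 1 := by
  have h := drop_gt x t hs
  have hcd : (t.dropWhile (· == x)).count x = 0 := by
    rw [List.count_eq_zero]
    intro hx; exact absurd (h x hx) (lt_irrefl x)
  have hct : (t.takeWhile (· == x)).count x = (t.takeWhile (· == x)).length := by
    rw [List.count_eq_length]
    intro b hb
    have hb2 : (b == x) = true := List.mem_takeWhile_imp (p := (· == x)) hb
    have : b = x := by simpa using hb2
    omega
  calc (x :: t).count x = t.count x + 1 := by rw [List.count_cons_self]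
    _ = ((t.takeWhile (· == x)) ++ (t.dropWhile (· == x))).count x + 1 := by
        rw [List.takeWhile_append_dropWhile]
    _ = _ := by rw [List.count_append, hcd, hct]

-- multiplicities of larger values are unchanged by dropping the leading run
theorem count_gt (x : Int) (t : List Int) (v : Int) (hv : x < v) :
    (x :: t).count v = (t.dropWhile (· == x)).count v := by
  have hct : (t.takeWhile (· == x)).count v = 0 := by
    rw [List.count_eq_zero]
    intro hvm
    have h1 : (v == x) = true := List.mem_takeWhile_imp (p := (· == x)) hvm
    have : v = x := by simpa using h1
    omega
  rw [List.count_cons, if_neg (by intro h; simp at h; omega)]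
  conv_lhs => rw [← List.takeWhile_append_dropWhile (p := (· == x)) (l := t)]
  rw [List.count_append, hct]; omega

theorem mem_iff_drop (x : Int) (t : List Int) (v : Int) :
    v ∈ (x :: t) ↔ v = x ∨ v ∈ t.dropWhile (· == x) := by
  constructor
  · intro h
    rcases List.mem_cons.1 h with h | h
    · exact Or.inl h
    · rw [← List.takeWhile_append_dropWhile (p := (· == x)) (l := t)] at h
      rcases List.mem_append.1 h with h | h
      · exact Or.inl (by simpa using List.mem_takeWhile_imp (p := (· == x)) h)
      · exact Or.inr h
  · rintro (h | h)
    · simp [h]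
    · exact List.mem_cons_of_mem _ ((List.dropWhile_sublist _).subset h)

-- membership in the run-length pairs of a sorted list
theorem rle_mem (s : List Int) (hs : s.Pairwise (· ≤ ·)) (c v : Int) :
    (c, v) ∈ rlePairs_alt s ↔ v ∈ s ∧ v ≠ 0 ∧ c = (s.count v : Int) := by
  induction s using rlePairs_alt.induct with
  | case1 => simp [rlePairs_alt]
  | case2 x t hx ih =>
    have hd : (t.dropWhile (· == x)).Pairwise (· ≤ ·) := hs.of_cons.sublist (List.dropWhile_sublist _)
    have ih := ih hd
    have hgt := drop_gt x t hs
    rw [rlePairs_alt]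
    simp only [if_pos hx]
    constructor
    · intro h
      rcases List.mem_cons.1 h with h | h
      · have hv : v = x := congrArg Prod.snd h
        have hc : c = ((t.takeWhile (· == x)).length + 1 : Int) := congrArg Prod.fst h
        subst hv
        refine ⟨List.mem_cons_self, hx, ?_⟩
        rw [count_head v t hs]; push_cast; omega
      · obtain ⟨hm, h0, hc⟩ := ih.1 h
        have hlt := hgt v hm
        refine ⟨List.mem_cons_of_mem _ ((List.dropWhile_sublist _).subset hm), h0, ?_⟩
        rw [count_gt x t v hlt]; exact hc
    · rintro ⟨hm, h0, hc⟩
      rcases (mem_iff_drop x t v).1 hm with h | h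
      · subst h
        have hc2 : c = ((t.takeWhile (· == v)).length + 1 : Int) := by
          rw [count_head v t hs] at hc; push_cast at hc; omega
        rw [hc2]; exact List.mem_cons_self
      · right
        exact ih.2 ⟨h, h0, by rw [count_gt x t v (hgt v h)] at hc; exact hc⟩
  | case3 x t hx ih =>
    have hd : (t.dropWhile (· == x)).Pairwise (· ≤ ·) := hs.of_cons.sublist (List.dropWhile_sublist _)
    have ih := ih hd
    have hgt := drop_gt x t hs
    rw [rlePairs_alt]
    simp only [if_neg hx]
    rw [not_not] at hx; subst hx
    rw [ih]
    constructor
    · rintro ⟨hm, h0, hc⟩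
      have hlt := hgt v hm
      exact ⟨List.mem_cons_of_mem _ ((List.dropWhile_sublist _).subset hm), h0,
        by rw [count_gt 0 t v hlt]; exact hc⟩
    · rintro ⟨hm, h0, hc⟩
      rcases (mem_iff_drop 0 t v).1 hm with h | h
      · exact absurd h h0
      · exact ⟨h, h0, by rw [count_gt 0 t v (hgt v h)] at hc; exact hc⟩

-- the values of the run-length pairs are strictly increasing
theorem rle_snd_pairwise (s : List Int) (hs : s.Pairwise (· ≤ ·)) :
    (rlePairs_alt s).Pairwise (fun p q => p.2 < q.2) := by
  induction s using rlePairs_alt.induct with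
  | case1 => simp [rlePairs_alt]
  | case2 x t hx ih =>
    have hd : (t.dropWhile (· == x)).Pairwise (· ≤ ·) := hs.of_cons.sublist (List.dropWhile_sublist _)
    have ih := ih hd
    have hgt := drop_gt x t hs
    rw [rlePairs_alt]
    simp only [if_pos hx]
    refine List.Pairwise.cons ?_ ih
    intro q hq
    have hmem := (rle_mem _ hd q.1 q.2).1 (by simpa using hq)
    exact hgt q.2 hmem.1
  | case3 x t hx ih =>
    have hd : (t.dropWhile (· == x)).Pairwise (· ≤ ·) := hs.of_cons.sublist (List.dropWhile_sublist _)
    rw [rlePairs_alt]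
    simp only [if_neg hx]
    exact ih hd

theorem rle_nodup (s : List Int) (hs : s.Pairwise (· ≤ ·)) : (rlePairs_alt s).Nodup :=
  (rle_snd_pairwise s hs).imp (fun h => by intro he; rw [he] at h; exact absurd h (lt_irrefl _))

-- the two-component Python tuple comparison is the lexicographic order
theorem before_eq {α : Type} (k1 k2 : α → Int) (a b : α) :
    (decide (k1 a < k1 b) || !decide (k1 b < k1 a) && decide (k2 a < k2 b))
      = decide (toLex (k1 a, k2 a) < toLex (k1 b, k2 b)) := by
  rcases lt_trichotomy (k1 a) (k1 b) with h | h | h <;>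
    simp [Prod.Lex.toLex_lt_toLex, h] <;> omega

-- a sort with a two-component key is the sort by the corresponding lexicographic key
theorem sorted2_eq_sorted_toLex {α : Type} (xs : List α) (k1 k2 : α → Int) :
    PySem.List.sorted2 xs k1 k2 = PySem.List.sorted xs (fun x => toLex (k1 x, k2 x)) := by
  show List.foldl _ [] xs = List.foldl _ [] xs
  simp only [if_neg (by simp : ¬ (false = true))]
  congr 1
  funext acc x
  congr 1
  funext a b
  exact before_eq k1 k2 a b

-- core permutation: swapped run-length pairs of the sorted row ~ nonzero Counter items
theorem core_perm (a : List Int) :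
    ((rlePairs_alt (PySem.List.sorted a (fun x => x))).map (fun p => (p.2, p.1))).Perm
      ((PySem.Dict.counter a).items.filter (fun kv => !(kv.1 == 0))) := by
  have hs : (PySem.List.sorted a (fun x => x)).Pairwise (· ≤ ·) :=
    PySem.List.sorted_pairwise a (fun x => x)
  have hperm := PySem.List.sorted_perm a (fun x => x) false
  rw [List.perm_ext_iff_of_nodup]
  · rintro ⟨k, v⟩
    rw [List.mem_map, List.mem_filter, PySem.Dict.items_counter, List.mem_map]
    constructor
    · rintro ⟨⟨c, w⟩, hm, he⟩
      obtain ⟨hw, h0, hc⟩ := (rle_mem _ hs c w).1 hm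
      have hk : w = k := congrArg Prod.fst he
      have hv : c = v := congrArg Prod.snd he
      subst hk; subst hv
      refine ⟨⟨w, (PySem.Set.mem_ofList _ _).2 (hperm.subset hw), ?_⟩, by simpa using h0⟩
      rw [Prod.mk.injEq]
      exact ⟨rfl, by rw [hc, hperm.count_eq]⟩
    · rintro ⟨⟨u, hu, he⟩, h0⟩
      have hk : u = k := congrArg Prod.fst he
      subst hk
      have hv : ((a.count u : Int)) = v := congrArg Prod.snd he
      refine ⟨(v, u), ?_, rfl⟩
      rw [rle_mem _ hs]
      have hu' : u ∈ a := (PySem.Set.mem_ofList _ _).1 hu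
      exact ⟨hperm.mem_iff.2 hu', by simpa using h0, by rw [hperm.count_eq]; omega⟩
  · refine List.Nodup.map ?_ (rle_nodup _ hs)
    intro p q h
    have h1 : p.2 = q.2 := congrArg Prod.fst h
    have h2 : p.1 = q.1 := congrArg Prod.snd h
    exact Prod.ext h2 h1
  · refine List.Nodup.filter _ ?_
    rw [PySem.Dict.items_counter]
    refine List.Nodup.map ?_ (PySem.Set.nodup_ofList a)
    intro u w h
    exact congrArg Prod.fst h

-- A's skip-zero extend loop, as a filter + flatMap
theorem foldA (L : List (Int × Int)) (acc : List Int) :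
    L.foldl (fun acc kv => if kv.1 = 0 then acc else acc ++ [kv.1, kv.2]) acc
      = acc ++ (L.filter (fun kv => !(kv.1 == 0))).flatMap (fun kv => [kv.1, kv.2]) := by
  induction L generalizing acc with
  | nil => simp
  | cons p L ih =>
    by_cases h : p.1 = 0
    · simp [List.foldl_cons, h, ih]
    · simp [List.foldl_cons, h, ih]

-- pairwise ≤ on an injective key plus nodup gives pairwise <
theorem pairwise_lt_of_le {α κ : Type} [LinearOrder κ] {l : List α} (key : α → κ)
    (hinj : Function.Injective key) (hle : l.Pairwise (fun a b => key a ≤ key b))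
    (hnd : l.Nodup) : l.Pairwise (fun a b => key a < key b) := by
  refine (hle.and hnd).imp ?_
  rintro a b ⟨h1, h2⟩
  exact lt_of_le_of_ne h1 (fun he => h2 (hinj he))

theorem keyA_inj : Function.Injective (fun kv : Int × Int => toLex (kv.2, kv.1)) := by
  intro p q h
  have h2 := toLex.injective h
  rw [Prod.mk.injEq] at h2
  exact Prod.ext h2.2 h2.1

theorem keyB_inj : Function.Injective (fun p : Int × Int => toLex (p.1, p.2)) := by
  intro p q h
  have h2 := toLex.injective h
  rw [Prod.mk.injEq] at h2
  exact Prod.ext h2.1 h2.2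

-- per-row equality of the two encodings
theorem row_eq (a : List Int) :
    (PySem.List.sorted2 (PySem.Dict.counter a).items (fun x => x.2) (fun x => x.1)).foldl
        (fun acc kv => if kv.1 = 0 then acc else acc ++ [kv.1, kv.2]) []
      = (PySem.List.sorted2 (rlePairs_alt (PySem.List.sorted a (fun x => x)))
            (fun p => p.1) (fun p => p.2)).foldl (fun acc cv => acc ++ [cv.2, cv.1]) [] := by
  have hs : (PySem.List.sorted a (fun x => x)).Pairwise (· ≤ ·) :=
    PySem.List.sorted_pairwise a (fun x => x)
  set items := (PySem.Dict.counter a).items with hitems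
  have hnditems : items.Nodup := by
    rw [hitems, PySem.Dict.items_counter]
    exact List.Nodup.map (fun u w h => congrArg Prod.fst h) (PySem.Set.nodup_ofList a)
  set pairsB := rlePairs_alt (PySem.List.sorted a (fun x => x)) with hpairs
  have hndB : pairsB.Nodup := rle_nodup _ hs
  rw [sorted2_eq_sorted_toLex, sorted2_eq_sorted_toLex, foldA,
      PySem.List.foldl_append_eq_flatMap]
  simp only [List.nil_append]
  have hA : (PySem.List.sorted items (fun x => toLex (x.2, x.1))).filter (fun kv => !(kv.1 == 0))
      = PySem.List.sorted (items.filter (fun kv => !(kv.1 == 0))) (fun x => toLex (x.2, x.1)) := by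
    refine (PySem.List.sorted_eq_of_perm_of_pairwise_lt _ _ _ ?_ ?_).symm
    · exact (PySem.List.sorted_perm items _ false).filter _
    · refine List.Pairwise.sublist List.filter_sublist ?_
      refine pairwise_lt_of_le _ keyA_inj (PySem.List.sorted_pairwise items _) ?_
      exact ((PySem.List.sorted_perm items _ false).nodup_iff).2 hnditems
  have hB : (PySem.List.sorted pairsB (fun p => toLex (p.1, p.2))).map (fun p => (p.2, p.1))
      = PySem.List.sorted (items.filter (fun kv => !(kv.1 == 0))) (fun x => toLex (x.2, x.1)) := by
    refine (PySem.List.sorted_eq_of_perm_of_pairwise_lt _ _ _ ?_ ?_).symm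
    · exact (((PySem.List.sorted_perm pairsB _ false).map _).trans (core_perm a))
    · rw [List.pairwise_map]
      refine pairwise_lt_of_le (fun p => toLex (p.1, p.2)) keyB_inj
        (PySem.List.sorted_pairwise pairsB _) ?_
      exact ((PySem.List.sorted_perm pairsB _ false).nodup_iff).2 hndB
  rw [hA, ← hB]
  simp [List.flatMap_map]

-- A's row encoding, named for the fold-splitting lemma
def rowA (a : List Int) : List Int :=
  (PySem.List.sorted2 (PySem.Dict.counter a).items (fun x => x.2) (fun x => x.1)).foldl
    (fun acc kv => if kv.1 = 0 then acc else acc ++ [kv.1, kv.2]) []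

-- A's single loop over the rows splits into a map and a running maximum
theorem foldl_split (L : List (List Int)) (rs : List (List Int)) (m : Int) :
    L.foldl (fun (st : List (List Int) × Int) a =>
      let count := PySem.List.sorted2 (PySem.Dict.counter a).items (fun x => x.2) (fun x => x.1)
      let row := count.foldl (fun acc kv => if kv.1 = 0 then acc else acc ++ [kv.1, kv.2]) []
      (st.1 ++ [row], max st.2 (row.length : Int))) (rs, m)
    = (rs ++ L.map rowA, (L.map rowA).foldl (fun m r => max m ((r.length : Nat) : Int)) m) := by
  induction L generalizing rs m with
  | nil => simp
  | cons a L ih =>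
    rw [List.foldl_cons]
    show List.foldl _ (rs ++ [rowA a], max m ((rowA a).length : Int)) L = _
    rw [ih]
    simp

theorem foldl_max_cast (ns : List Nat) (i : Nat) :
    ns.foldl (fun (m : Int) n => max m ((n : Nat) : Int)) (i : Int)
      = ((ns.foldl max i : Nat) : Int) := by
  induction ns generalizing i with
  | nil => rfl
  | cons n ns ih =>
    rw [List.foldl_cons, List.foldl_cons, ← ih]
    congr 1
    omega

-- ===== VERDICT (by name: the statement is the Claim_ definition above) =====
theorem op_r_spec : Claim_equal_op_r := by
  intro arr _
  show op_r arr = op_r_alt arr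
  unfold op_r op_r_alt
  simp only []
  rw [foldl_split]
  have hrows : arr.map rowA = arr.map (fun a =>
      (PySem.List.sorted2 (rlePairs_alt (PySem.List.sorted a (fun x => x)))
        (fun p => p.1) (fun p => p.2)).foldl (fun acc cv => acc ++ [cv.2, cv.1]) []) :=
    List.map_congr_left (fun a _ => row_eq a)
  rw [List.nil_append, hrows]
  set rows := arr.map (fun a =>
      (PySem.List.sorted2 (rlePairs_alt (PySem.List.sorted a (fun x => x)))
        (fun p => p.1) (fun p => p.2)).foldl (fun acc cv => acc ++ [cv.2, cv.1]) []) with hrowsdef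
  cases hr : rows with
  | nil => simp
  | cons r rs =>
    have hfold : rows.foldl (fun (m : Int) r => max m ((r.length : Nat) : Int)) 0
        = (((rs.map List.length).foldl max r.length : Nat) : Int) := by
      rw [hr, List.foldl_cons]
      have : (max (0 : Int) ((r.length : Nat) : Int)) = ((r.length : Nat) : Int) := by omega
      rw [this]
      rw [← foldl_max_cast, List.foldl_map]
    have hw : PySem.List.max? ((rows.map List.length)) (fun n => n)
        = some ((rs.map List.length).foldl max r.length) := by
      rw [hr, List.map_cons]
      exact PySem.List.max?_id_cons _ _
    have hmatch : (match PySem.List.max? ((rows.map List.length)) (fun n => n) with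
        | none => 0 | some w => w) = (rs.map List.length).foldl max r.length := by
      rw [hw]
    rw [← hr]
    simp only []
    rw [hfold, hmatch]
    apply List.map_congr_left
    intro x _
    congr 1
    congr 1
    omega
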